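-- pv_equiv track=rewrite | github.com/jyesselm/find_pair | scripts/extract_minimal_pairs.py | get_residue_range_for_pairs
-- ===== SOURCE A (Python) =====
-- from typing import List, Tuple, Dict, Set, Optional
--
-- def get_residue_range_for_pairs(pairs: List[Tuple[int, int]],
--                                 residue_map: Dict[int, Tuple[str, str, int, str]]) -> Optional[Tuple[Set[Tuple[str, str, int, str]], Set[int]]]:
--     """
--     Get all residues (by PDB properties) needed for a set of base pairs.
--
--     Returns: (set of (residue_name, chain_id, residue_seq, insertion), set of legacy_indices)
--     """
--     residues = set()
--     legacy_indices = set()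
--
--     for res1_idx, res2_idx in pairs:
--         legacy_indices.add(res1_idx)
--         legacy_indices.add(res2_idx)
--
--         if res1_idx in residue_map:
--             residues.add(residue_map[res1_idx])
--         if res2_idx in residue_map:
--             residues.add(residue_map[res2_idx])
--
--     if not residues:
--         return None
--
--     return (residues, legacy_indices)
-- ===== SOURCE B (Python) =====
-- from typing import List, Tuple, Dict, Set, Optional
--
-- def get_residue_range_for_pairs(pairs: List[Tuple[int, int]],
--                                 residue_map: Dict[int, Tuple[str, str, int, str]]) -> Optional[Tuple[Set[Tuple[str, str, int, str]], Set[int]]]: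
--     """Divide-and-conquer: split the pair list in half, collect each half recursively,
--     and merge the results with set union (correct because set union is associative and
--     order-insensitive, and every pair contributes independently)."""
--     residues, legacy_indices = _collect(pairs, residue_map)
--     if not residues:
--         return None
--     return (residues, legacy_indices)
--
-- def _collect(pairs: List[Tuple[int, int]],
--              residue_map: Dict[int, Tuple[str, str, int, str]]) -> Tuple[Set[Tuple[str, str, int, str]], Set[int]]:
--     n = len(pairs)
--     if n == 0:
--         return (set(), set())
--     if n == 1:
--         a, b = pairs[0]
--         return ({residue_map[i] for i in (a, b) if i in residue_map}, {a, b})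
--     mid = n // 2
--     res_l, idx_l = _collect(pairs[:mid], residue_map)
--     res_r, idx_r = _collect(pairs[mid:], residue_map)
--     return (res_l | res_r, idx_l | idx_r)
-- ===== Notes on version B (the rewrite author's own statement) =====
-- stated objective: alternative
-- what changed: A accumulates both sets in one left-to-right loop over pairs; B is a divide-and-conquer recursion that splits the pair list in half, collects each half independently, and merges the two halves' results with set union.
import Mathlib
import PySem

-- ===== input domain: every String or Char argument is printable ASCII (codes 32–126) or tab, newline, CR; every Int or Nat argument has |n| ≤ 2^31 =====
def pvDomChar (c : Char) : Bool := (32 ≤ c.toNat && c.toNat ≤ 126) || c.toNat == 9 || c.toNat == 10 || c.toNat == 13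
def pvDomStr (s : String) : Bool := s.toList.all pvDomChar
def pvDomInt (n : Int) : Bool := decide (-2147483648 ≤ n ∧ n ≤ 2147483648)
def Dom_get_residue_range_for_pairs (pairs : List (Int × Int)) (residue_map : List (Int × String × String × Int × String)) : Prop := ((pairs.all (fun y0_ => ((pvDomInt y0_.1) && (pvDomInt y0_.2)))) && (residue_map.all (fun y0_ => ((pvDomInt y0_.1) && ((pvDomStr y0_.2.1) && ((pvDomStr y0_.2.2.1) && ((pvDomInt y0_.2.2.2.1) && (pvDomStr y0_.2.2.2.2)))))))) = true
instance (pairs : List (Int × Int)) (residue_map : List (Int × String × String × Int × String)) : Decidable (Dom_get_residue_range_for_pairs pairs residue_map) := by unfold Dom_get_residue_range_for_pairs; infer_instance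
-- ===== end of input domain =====

-- B replaces A's single left-to-right accumulating loop over pairs by a divide-and-conquer
-- recursion (split in half, collect each half, merge with set union); objective: alternative,
-- same results. Outputs are Python sets, so only set contents are observable.

-- residue_map[i] / 'i in residue_map': first-match lookup in the association list (both Pythons use the dict this way)
def pvLookup (residue_map : List (Int × String × String × Int × String)) (i : Int) : Option (String × String × Int × String) :=
  (PySem.Dict.mk residue_map).get? i

-- ===== PORT A =====
-- A's loop body: add both indices to legacy_indices, and each residue found in residue_map to residues
def pvStepA (residue_map : List (Int × String × String × Int × String))
    (st : PySem.Set (String × String × Int × String) × PySem.Set Int) (p : Int × Int) :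
    PySem.Set (String × String × Int × String) × PySem.Set Int :=
  let legacy := PySem.Set.add (PySem.Set.add st.2 p.1) p.2
  let rs1 := match pvLookup residue_map p.1 with
    | some v => PySem.Set.add st.1 v
    | none   => st.1
  let rs2 := match pvLookup residue_map p.2 with
    | some v => PySem.Set.add rs1 v
    | none   => rs1
  (rs2, legacy)

def get_residue_range_for_pairs (pairs : List (Int × Int)) (residue_map : List (Int × String × String × Int × String)) : Option ((List (String × String × Int × String)) × List Int) :=
  -- one loop over pairs, maintaining both sets
  let st := pairs.foldl (pvStepA residue_map) (PySem.Set.empty, PySem.Set.empty)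
  if st.1 = [] then none else some (st.1, st.2)

-- ===== PORT B =====
-- the leaf comprehension's body: add residue_map[i] when i is a key
def pvStepB (residue_map : List (Int × String × String × Int × String))
    (s : PySem.Set (String × String × Int × String)) (i : Int) :
    PySem.Set (String × String × Int × String) :=
  match pvLookup residue_map i with
  | some v => PySem.Set.add s v
  | none   => s

-- _collect: divide and conquer over the pair list (splits via take/drop; mid = n // 2 with n ≥ 2, exact for Python's slicing here)
def pvCollect (rm : List (Int × String × String × Int × String)) :
    List (Int × Int) → PySem.Set (String × String × Int × String) × PySem.Set Int
  | [] => (PySem.Set.empty, PySem.Set.empty)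
  | [p] => ([p.1, p.2].foldl (pvStepB rm) PySem.Set.empty, PySem.Set.ofList [p.1, p.2])
  | p :: q :: rest =>
    -- mid = n // 2 with n = len(pairs) ≥ 2; pairs[:mid] / pairs[mid:] are take / drop (exact: 0 ≤ mid ≤ n)
    match pvCollect rm ((p :: q :: rest).take ((p :: q :: rest).length / 2)),
          pvCollect rm ((p :: q :: rest).drop ((p :: q :: rest).length / 2)) with
    | (resL, idxL), (resR, idxR) => (PySem.Set.union resL resR, PySem.Set.union idxL idxR)
termination_by ps => ps.length
decreasing_by
  · simp [List.length_take]; omega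
  · simp; omega

def get_residue_range_for_pairs_alt (pairs : List (Int × Int)) (residue_map : List (Int × String × String × Int × String)) : Option ((List (String × String × Int × String)) × List Int) :=
  let st := pvCollect residue_map pairs
  if st.1 = [] then none else some (st.1, st.2)

-- ===== PRECONDITION & SPEC =====
def Spec_get_residue_range_for_pairs (pairs : List (Int × Int)) (residue_map : List (Int × String × String × Int × String)) (out : Option ((List (String × String × Int × String)) × List Int)) : Prop := out = get_residue_range_for_pairs_alt pairs residue_map
instance (pairs : List (Int × Int)) (residue_map : List (Int × String × String × Int × String)) (out : Option ((List (String × String × Int × String)) × List Int)) : Decidable (Spec_get_residue_range_for_pairs pairs residue_map out) := by unfold Spec_get_residue_range_for_pairs; infer_instance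

-- ===== CLAIM (what is proved, stated in full; the proofs are below) =====
def Claim_equal_get_residue_range_for_pairs : Prop := ∀ (pairs : List (Int × Int)) (residue_map : List (Int × String × String × Int × String)), Dom_get_residue_range_for_pairs pairs residue_map → Spec_get_residue_range_for_pairs pairs residue_map (get_residue_range_for_pairs pairs residue_map)

-- ===== LEMMAS AND PROOFS =====

-- the leaf comprehension over a list is an update by the filterMapped list
theorem pvFoldStep (rm : List (Int × String × String × Int × String)) (ys : List Int)
    (s : PySem.Set (String × String × Int × String)) :
    ys.foldl (pvStepB rm) s = PySem.Set.update s (ys.filterMap (pvLookup rm)) := by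
  induction ys generalizing s with
  | nil => rfl
  | cons y ys ih =>
    simp only [List.foldl_cons, List.filterMap_cons, pvStepB]
    cases pvLookup rm y with
    | none => exact ih s
    | some v => simpa [PySem.Set.update_cons] using ih (PySem.Set.add s v)

-- A's combined loop over pairs splits into the two updates over the flattened index list
theorem pvFoldA (rm : List (Int × String × String × Int × String)) (ps : List (Int × Int))
    (r : PySem.Set (String × String × Int × String)) (l : PySem.Set Int) :
    ps.foldl (pvStepA rm) (r, l)
      = (PySem.Set.update r ((ps.flatMap (fun p => [p.1, p.2])).filterMap (pvLookup rm)),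
         PySem.Set.update l (ps.flatMap (fun p => [p.1, p.2]))) := by
  induction ps generalizing r l with
  | nil => rfl
  | cons p ps ih =>
    simp only [List.foldl_cons, List.flatMap_cons, List.filterMap_append]
    rw [show pvStepA rm (r, l) p
          = ((match pvLookup rm p.2 with
              | some v => PySem.Set.add (match pvLookup rm p.1 with
                  | some v => PySem.Set.add r v | none => r) v
              | none => match pvLookup rm p.1 with
                  | some v => PySem.Set.add r v | none => r),
             PySem.Set.add (PySem.Set.add l p.1) p.2) from rfl,
        ih, PySem.Set.update_append, PySem.Set.update_append]
    cases hg1 : pvLookup rm p.1 <;> cases hg2 : pvLookup rm p.2 <;>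
      simp [hg1, hg2, PySem.Set.update_cons, PySem.Set.update_nil]

-- deduplicating the update list first changes nothing: a repeated element is a no-op add
theorem pvUpdateOfList {α : Type} [BEq α] [LawfulBEq α] (s : PySem.Set α) (ys : List α) :
    PySem.Set.update s (PySem.Set.ofList ys) = PySem.Set.update s ys := by
  induction ys using List.reverseRecOn with
  | nil => rfl
  | append_singleton ys y ih =>
    rw [PySem.Set.ofList_append_singleton, PySem.Set.update_append]
    by_cases hy : y ∈ ys
    · rw [PySem.Set.add_of_mem ((PySem.Set.mem_ofList ys y).mpr hy), ih]
      have : y ∈ PySem.Set.update s ys := (PySem.Set.mem_update s ys y).mpr (Or.inr hy)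
      simp [PySem.Set.update_cons, PySem.Set.update_nil, PySem.Set.add_of_mem this]
    · rw [PySem.Set.add_of_not_mem (fun h => hy ((PySem.Set.mem_ofList ys y).mp h)),
          PySem.Set.update_append, ih]

-- union of the ofLists of two fragments is the ofList of their concatenation
theorem pvUnionOfList {α : Type} [BEq α] [LawfulBEq α] (xs ys : List α) :
    PySem.Set.union (PySem.Set.ofList xs) (PySem.Set.ofList ys) = PySem.Set.ofList (xs ++ ys) := by
  show PySem.Set.update (PySem.Set.ofList xs) (PySem.Set.ofList ys) = _
  rw [pvUpdateOfList]
  show List.foldl PySem.Set.add (List.foldl PySem.Set.add [] xs) ys = List.foldl PySem.Set.add [] (xs ++ ys)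
  rw [List.foldl_append]

-- characterisation of B's divide-and-conquer collector
theorem pvCollectEq (rm : List (Int × String × String × Int × String)) (ps : List (Int × Int)) :
    pvCollect rm ps
      = (PySem.Set.ofList ((ps.flatMap (fun p => [p.1, p.2])).filterMap (pvLookup rm)),
         PySem.Set.ofList (ps.flatMap (fun p => [p.1, p.2]))) := by
  induction ps using pvCollect.induct rm with
  | case1 => simp only [pvCollect]; rfl
  | case2 p =>
    simp only [pvCollect]
    rw [pvFoldStep]
    simp [PySem.Set.update_nil_left]
  | case3 p q rest resL idxL resR idxR hR hL ihl ihr =>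
    simp only [pvCollect]
    rw [hL, hR]
    rw [ihl] at hL
    rw [ihr] at hR
    injection hL with e1 e2
    injection hR with e3 e4
    subst e1 e2 e3 e4
    rw [pvUnionOfList, pvUnionOfList, ← List.filterMap_append, ← List.flatMap_append,
        List.take_append_drop]

-- ===== VERDICT (by name: the statement is the Claim_ definition above) =====
theorem get_residue_range_for_pairs_spec : Claim_equal_get_residue_range_for_pairs := by
  intro pairs residue_map _
  unfold Spec_get_residue_range_for_pairs
  unfold get_residue_range_for_pairs get_residue_range_for_pairs_alt
  dsimp only
  rw [pvFoldA residue_map pairs, pvCollectEq residue_map pairs]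
  simp only [PySem.Set.empty]
  rw [PySem.Set.update_nil_left, PySem.Set.update_nil_left]
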